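-- pv_equiv track=rewrite | github.com/chanrt/image-segmentation-ocr | src/segment_characters.py | get_bounding_rows
-- ===== SOURCE A (Python) =====
-- def get_bounding_rows(vertical_histogram):
--     num_rows = len(vertical_histogram)
--
--     top_row = 0
--     for i in range(num_rows):
--         if vertical_histogram[i] != 0:
--             top_row = i
--             break
--
--     bottom_row = num_rows - 1
--     for i in range(num_rows - 1, -1, -1):
--         if vertical_histogram[i] != 0:
--             bottom_row = i
--             break
--
--     return top_row, bottom_row
-- ===== SOURCE B (Python) =====
-- def get_bounding_rows(vertical_histogram):
--     idx = [i for i, v in enumerate(vertical_histogram) if v != 0]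
--     top = idx[0] if idx else 0
--     bottom = idx[-1] if idx else len(vertical_histogram) - 1
--     return top, bottom
-- ===== Notes on version B (the rewrite author's own statement) =====
-- stated objective: simpler
-- what changed: Replaces the two early-breaking index scans (forward and backward) with one forward enumerate pass that collects all nonzero indices and reads off its endpoints, with the same all-zero/empty fallbacks.
import Mathlib
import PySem

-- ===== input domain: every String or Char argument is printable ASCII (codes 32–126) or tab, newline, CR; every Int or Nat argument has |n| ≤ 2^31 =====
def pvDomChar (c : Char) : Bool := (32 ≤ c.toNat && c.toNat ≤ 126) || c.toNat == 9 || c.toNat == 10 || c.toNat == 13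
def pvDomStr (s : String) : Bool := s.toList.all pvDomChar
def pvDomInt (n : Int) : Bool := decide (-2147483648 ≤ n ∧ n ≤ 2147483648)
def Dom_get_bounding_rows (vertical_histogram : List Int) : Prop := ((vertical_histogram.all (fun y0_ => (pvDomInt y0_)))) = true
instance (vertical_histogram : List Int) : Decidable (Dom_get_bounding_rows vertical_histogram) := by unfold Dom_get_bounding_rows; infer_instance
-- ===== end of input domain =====

-- B replaces A's two early-breaking scans by one enumerate pass collecting the nonzero
-- indices and reading off its endpoints (objective: simpler).

-- ===== PORT A =====
-- first loop: 'for i in range(num_rows): if vh[i] != 0: top_row = i; break'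
-- (walks the list carrying the index i; break = return i, loop end = default 0)
def pvLoopTop : List Int → Nat → Int
  | [], _ => 0
  | v :: rest, i => if v ≠ 0 then (i : Int) else pvLoopTop rest (i + 1)

-- second loop: 'for i in range(num_rows - 1, -1, -1): if vh[i] != 0: bottom_row = i; break'
-- (counts down; fuel k means the next index tried is k-1; loop end = default num_rows - 1)
def pvLoopBot (vh : List Int) : Nat → Int
  | 0 => (vh.length : Int) - 1
  | k + 1 => if (PySem.List.pyGet? vh (k : Int)).getD 0 ≠ 0 then (k : Int) else pvLoopBot vh k

def get_bounding_rows (vertical_histogram : List Int) : Int × Int :=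
  (pvLoopTop vertical_histogram 0, pvLoopBot vertical_histogram vertical_histogram.length)

-- ===== PORT B =====
def get_bounding_rows_alt (vertical_histogram : List Int) : Int × Int :=
  let idx : List Int := vertical_histogram.zipIdx.filterMap
    (fun p => if p.1 ≠ 0 then some ((p.2 : Int)) else none)
  (idx.head?.getD 0, idx.getLast?.getD ((vertical_histogram.length : Int) - 1))

-- ===== PRECONDITION & SPEC =====
def Spec_get_bounding_rows (vertical_histogram : List Int) (out : Int × Int) : Prop := out = get_bounding_rows_alt vertical_histogram
instance (vertical_histogram : List Int) (out : Int × Int) : Decidable (Spec_get_bounding_rows vertical_histogram out) := by unfold Spec_get_bounding_rows; infer_instance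

-- ===== CLAIM (what is proved, stated in full; the proofs are below) =====
def Claim_equal_get_bounding_rows : Prop := ∀ (vertical_histogram : List Int), Dom_get_bounding_rows vertical_histogram → Spec_get_bounding_rows vertical_histogram (get_bounding_rows vertical_histogram)

-- ===== LEMMAS AND PROOFS =====

def pvF : Int × Nat → Option Int := fun p => if p.1 ≠ 0 then some ((p.2 : Int)) else none

theorem pvLoopTop_eq (vh : List Int) : ∀ (n : Nat),
    pvLoopTop vh n = ((vh.zipIdx n).filterMap pvF).head?.getD 0 := by
  induction vh with
  | nil => intro n; simp [pvLoopTop]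
  | cons v rest ih =>
    intro n
    by_cases hv : v = 0 <;> simp [pvLoopTop, hv, pvF, ih]

theorem pvLoopBot_eq (vh : List Int) : ∀ (k : Nat), k ≤ vh.length →
    pvLoopBot vh k = (((vh.take k).zipIdx).filterMap pvF).getLast?.getD ((vh.length : Int) - 1) := by
  intro k
  induction k with
  | zero => intro _; simp [pvLoopBot]
  | succ k ih =>
    intro hk
    have hklt : k < vh.length := by omega
    have hget : PySem.List.pyGet? vh (k : Int) = some vh[k] := by
      rw [PySem.List.pyGet?_natCast]; simp [hklt]
    have htake : vh.take (k + 1) = vh.take k ++ [vh[k]] := by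
      rw [List.take_add_one]; simp [hklt]
    have hlen : (vh.take k).length = k := by simp; omega
    by_cases hv : vh[k] = 0
    · have hstep : pvLoopBot vh (k + 1) = pvLoopBot vh k := by
        simp [pvLoopBot, hget, hv]
      rw [hstep, ih (by omega), htake, List.zipIdx_append, List.filterMap_append]
      simp [pvF, hv]
    · rw [htake, List.zipIdx_append, List.filterMap_append]
      simp [pvLoopBot, hget, hv, pvF, hlen]

-- ===== VERDICT (by name: the statement is the Claim_ definition above) =====
theorem get_bounding_rows_spec : Claim_equal_get_bounding_rows := by
  intro vh _
  show _ = _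
  unfold get_bounding_rows get_bounding_rows_alt
  rw [pvLoopTop_eq vh 0, pvLoopBot_eq vh vh.length le_rfl, List.take_length]
  rfl
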